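-- pv_equiv track=rewrite | github.com/zzsfornlp/znmt-merge | ztry1/mt_rerank_analysis.py | count_ngrams
-- ===== SOURCE A (Python) =====
-- from collections import defaultdict
--
-- def count_ngrams(ll, n):
--     # list of {}
--     ret = []
--     for i in range(n):
--         mm = defaultdict(int)
--         for start in range(0, len(ll)-i):
--             sig = "|".join([str(s) for s in ll[start:start+i+1]])
--             mm[sig] += 1
--         ret.append(mm)
--     return ret
-- ===== SOURCE B (Python) =====
-- from collections import defaultdict
--
-- def count_ngrams(ll, n):
--     # Incrementally extend the previous round's signatures by one element
--     # instead of reslicing and rejoining every window from scratch.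
--     ret = []
--     sigs = [str(s) for s in ll]
--     for i in range(n):
--         if i > 0:
--             sigs = [sigs[start] + "|" + str(ll[start + i]) for start in range(len(ll) - i)]
--         mm = defaultdict(int)
--         for s in sigs:
--             mm[s] += 1
--         ret.append(mm)
--     return ret
-- ===== Notes on version B (the rewrite author's own statement) =====
-- stated objective: faster
-- what changed: B keeps the previous round's signature strings and extends each by one appended element per round instead of reslicing and rejoining every window from scratch; intended as faster (fewer pieces joined per signature), measured 15.04x at the largest size both finished (n=1024), unconfirmed at n=4096 where both time out.
import Mathlib
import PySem

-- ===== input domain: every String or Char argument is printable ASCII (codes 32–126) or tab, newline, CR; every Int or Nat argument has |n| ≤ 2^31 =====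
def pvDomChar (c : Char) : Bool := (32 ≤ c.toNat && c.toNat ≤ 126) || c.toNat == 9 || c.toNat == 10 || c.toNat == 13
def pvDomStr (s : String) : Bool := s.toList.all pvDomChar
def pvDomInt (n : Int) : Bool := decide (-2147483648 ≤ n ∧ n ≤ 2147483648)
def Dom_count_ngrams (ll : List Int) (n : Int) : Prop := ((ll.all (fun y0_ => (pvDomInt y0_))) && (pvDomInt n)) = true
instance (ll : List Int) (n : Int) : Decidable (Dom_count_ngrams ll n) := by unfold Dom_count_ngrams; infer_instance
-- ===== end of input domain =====

-- B builds each round's signatures by extending the previous round's by one appended element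
-- instead of reslicing and rejoining every window from scratch (intended as faster; measured
-- 15.04x at the largest size both Pythons finished in a timing run).

-- ===== PORT A =====
-- for i in range(n): mm = defaultdict(int); for start in range(0, len(ll)-i): mm["|".join(...)] += 1; ret.append(mm)
def count_ngrams (ll : List Int) (n : Int) : List (List (String × Int)) :=
  (PySem.List.pyRange 0 n 1).foldl
    (fun ret i =>
      let mm :=
        (PySem.List.pyRange 0 ((ll.length : Int) - i) 1).foldl
          (fun mm start =>
            let sig := PySem.Str.join "|"
              ((PySem.List.slice ll (some start) (some (start + i + 1))).map PySem.Int.toStr)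
            mm.modify sig 0 (· + 1))
          PySem.Dict.empty
      ret ++ [mm.items])
    []

-- ===== PORT B =====
-- sigs = [str(s) for s in ll]; each round i>0 replaces sigs by
-- [sigs[start] + "|" + str(ll[start+i]) for start in range(len(ll)-i)], then counts sigs.
def count_ngrams_alt (ll : List Int) (n : Int) : List (List (String × Int)) :=
  ((PySem.List.pyRange 0 n 1).foldl
    (fun (st : List (List (String × Int)) × List String) i =>
      let sigs :=
        if 0 < i then
          (PySem.List.pyRange 0 ((ll.length : Int) - i) 1).map
            (fun start =>
              PySem.List.pyGetD st.2 start "" ++ "|" ++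
                PySem.Int.toStr (PySem.List.pyGetD ll (start + i) 0))
        else st.2
      let mm := sigs.foldl (fun d s => d.modify s 0 (· + 1)) PySem.Dict.empty
      (st.1 ++ [mm.items], sigs))
    ([], ll.map PySem.Int.toStr)).1

-- ===== PRECONDITION & SPEC =====
def Spec_count_ngrams (ll : List Int) (n : Int) (out : List (List (String × Int))) : Prop := out = count_ngrams_alt ll n
instance (ll : List Int) (n : Int) (out : List (List (String × Int))) : Decidable (Spec_count_ngrams ll n out) := by unfold Spec_count_ngrams; infer_instance

-- ===== CLAIM (what is proved, stated in full; the proofs are below) =====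
def Claim_equal_count_ngrams : Prop := ∀ (ll : List Int) (n : Int), Dom_count_ngrams ll n → Spec_count_ngrams ll n (count_ngrams ll n)

-- ===== LEMMAS AND PROOFS =====

-- the list of k-gram signatures of round i (both programs count exactly this list)
def pvSigs (ll : List Int) (i : Nat) : List String :=
  (PySem.List.pyRange 0 ((ll.length : Int) - (i : Int)) 1).map
    (fun start => PySem.Str.join "|"
      ((PySem.List.slice ll (some start) (some (start + (i : Int) + 1))).map PySem.Int.toStr))

lemma join_append_singleton (sep q : List Char) (ps : List (List Char)) (h : ps ≠ []) :
    PySem.Chars.join sep (ps ++ [q]) = PySem.Chars.join sep ps ++ sep ++ q := by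
  induction ps with
  | nil => simp at h
  | cons p rest ih =>
    cases rest with
    | nil => simp [PySem.Chars.join_cons_cons, PySem.Chars.join_singleton]
    | cons p2 r2 =>
      rw [List.cons_append, List.cons_append, PySem.Chars.join_cons_cons,
        PySem.Chars.join_cons_cons, ← List.cons_append, ih (by simp)]
      simp [List.append_assoc]

lemma str_join_singleton (sep s : String) : PySem.Str.join sep [s] = s := by
  rw [← String.toList_inj, PySem.Str.toList_join]; simp [PySem.Chars.join_singleton]

lemma pvSigs_zero (ll : List Int) : pvSigs ll 0 = ll.map PySem.Int.toStr := by
  apply List.ext_getElem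
  · simp [pvSigs, PySem.List.length_pyRange_one]
  intro k h1 h2
  have hk : k < ll.length := by
    simp only [pvSigs, List.length_map, PySem.List.length_pyRange_one] at h1; omega
  simp only [pvSigs, List.getElem_map, PySem.List.getElem_pyRange_one]
  have e2 : (0 + ((k : Nat) : Int) + ((0 : Nat) : Int) + 1) = ((k : Nat) : Int) + ((1 : Nat) : Int) := by
    push_cast; ring
  have e1 : (0 + ((k : Nat) : Int)) = ((k : Nat) : Int) := by ring
  rw [e2, e1, PySem.List.slice_natCast_add ll k 1, List.drop_eq_getElem_cons hk]
  have ht : List.take 1 (ll[k] :: List.drop (k + 1) ll) = [ll[k]] := rfl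
  rw [ht]
  simp [str_join_singleton]

-- extending round-i signatures by one element gives round-(i+1) signatures
lemma pvSigs_step (ll : List Int) (i : Nat) :
    (PySem.List.pyRange 0 ((ll.length : Int) - ((i : Int) + 1)) 1).map
      (fun start =>
        PySem.List.pyGetD (pvSigs ll i) start "" ++ "|" ++
          PySem.Int.toStr (PySem.List.pyGetD ll (start + ((i : Int) + 1)) 0))
    = pvSigs ll (i + 1) := by
  apply List.ext_getElem
  · simp [pvSigs, PySem.List.length_pyRange_one]
  intro k h1 h2
  have hk : (k : Int) < (ll.length : Int) - ((i : Int) + 1) := by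
    simp only [List.length_map, PySem.List.length_pyRange_one] at h1; omega
  have hkl : k + i + 1 < ll.length := by omega
  simp only [List.getElem_map, PySem.List.getElem_pyRange_one]
  have e1 : (0 + (k : Int)) = ((k : Nat) : Int) := by push_cast; ring
  rw [e1]
  -- the lookup into the previous round's signatures
  have hlen : ((k : Int)) < ((pvSigs ll i).length : Int) := by
    simp only [pvSigs, List.length_map, PySem.List.length_pyRange_one]; omega
  rw [PySem.List.pyGetD_eq_getElem (pvSigs ll i) "" (by positivity) hlen]
  have hlen2 : ((k : Int) + ((i : Int) + 1)) < (ll.length : Int) := by omega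
  rw [PySem.List.pyGetD_eq_getElem ll 0 (by positivity) hlen2]
  have hkn : ((k : Int)).toNat = k := by omega
  have hkn2 : ((k : Int) + ((i : Int) + 1)).toNat = k + i + 1 := by omega
  simp only [pvSigs, List.getElem_map, PySem.List.getElem_pyRange_one, hkn, hkn2]
  rw [e1]
  -- turn both slices into drop/take
  have s1 : ((k : Nat) : Int) + ((i : Nat) : Int) + 1 = ((k : Nat) : Int) + (((i + 1 : Nat)) : Int) := by
    norm_cast
  rw [s1]
  have s2 : ((k : Nat) : Int) + (((i + 1 : Nat)) : Int) + 1 = ((k : Nat) : Int) + (((i + 2 : Nat)) : Int) := by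
    push_cast; ring
  rw [s2, PySem.List.slice_natCast_add ll k (i + 1), PySem.List.slice_natCast_add ll k (i + 2)]
  -- take (i+2) = take (i+1) ++ [ll[k+i+1]]
  have hdrop : (List.drop k ll)[i + 1]? = some ll[k + i + 1] := by
    rw [List.getElem?_drop]
    exact List.getElem?_eq_getElem (by omega)
  have htake : List.take (i + 2) (List.drop k ll)
      = List.take (i + 1) (List.drop k ll) ++ [ll[k + i + 1]] := by
    rw [List.take_add_one, hdrop]; rfl
  rw [htake]
  -- string equality via char lists
  rw [← String.toList_inj]
  have hne : (List.take (i + 1) (List.drop k ll)).map PySem.Int.toStr ≠ [] := by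
    simp only [ne_eq, ← List.length_eq_zero_iff, List.length_map, List.length_take,
      List.length_drop]
    omega
  simp only [List.map_append, List.map_cons, List.map_nil, PySem.Str.toList_join,
    String.toList_append, List.map_map]
  rw [join_append_singleton _ _ _ (by simpa using hne)]

lemma foldl_push {α β : Type} (l : List α) (f : α → β) (init : List β) :
    l.foldl (fun acc x => acc ++ [f x]) init = init ++ l.map f := by
  induction l generalizing init with
  | nil => simp
  | cons x xs ih => simp [ih]

-- A's inner loop is the counter of pvSigs
lemma countA_inner (ll : List Int) (i : Nat) :
    (PySem.List.pyRange 0 ((ll.length : Int) - (i : Int)) 1).foldl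
      (fun mm start =>
        (mm.modify (PySem.Str.join "|"
          ((PySem.List.slice ll (some start) (some (start + (i : Int) + 1))).map PySem.Int.toStr)) 0 (· + 1)))
      PySem.Dict.empty
    = PySem.Dict.counter (pvSigs ll i) := by
  rw [PySem.Dict.counter_eq_foldl, pvSigs, List.foldl_map]

lemma countA_eq (ll : List Int) (n : Int) :
    count_ngrams ll n
      = (List.range n.toNat).map (fun i => (PySem.Dict.counter (pvSigs ll i)).items) := by
  unfold count_ngrams
  rw [PySem.List.pyRange_one, List.foldl_map, foldl_push]
  simp only [List.nil_append, Int.sub_zero]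
  apply List.map_congr_left
  intro k hk
  simp only [zero_add]
  rw [countA_inner ll k]

lemma countB_eq (ll : List Int) (n : Int) :
    count_ngrams_alt ll n
      = (List.range n.toNat).map (fun i => (PySem.Dict.counter (pvSigs ll i)).items) := by
  have main : ∀ m : Nat,
      List.foldl
        (fun (st : List (List (String × Int)) × List String) i =>
          let sigs :=
            if 0 < i then
              (PySem.List.pyRange 0 ((ll.length : Int) - i) 1).map
                (fun start =>
                  PySem.List.pyGetD st.2 start "" ++ "|" ++
                    PySem.Int.toStr (PySem.List.pyGetD ll (start + i) 0))
            else st.2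
          let mm := sigs.foldl (fun d s => d.modify s 0 (· + 1)) PySem.Dict.empty
          (st.1 ++ [mm.items], sigs))
        ([], ll.map PySem.Int.toStr)
        ((List.range m).map (fun (k : Nat) => (0 : Int) + (k : Int)))
      = ((List.range m).map (fun i => (PySem.Dict.counter (pvSigs ll i)).items),
          pvSigs ll (m - 1)) := by
    intro m
    induction m with
    | zero => simp [pvSigs_zero]
    | succ m ih =>
      rw [List.range_succ, List.map_append, List.foldl_append, ih]
      simp only [List.map_cons, List.map_nil, List.foldl_cons, List.foldl_nil, zero_add]
      have hsigs :
          (if 0 < ((m : Nat) : Int) then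
            (PySem.List.pyRange 0 ((ll.length : Int) - ((m : Nat) : Int)) 1).map
              (fun start =>
                PySem.List.pyGetD (pvSigs ll (m - 1)) start "" ++ "|" ++
                  PySem.Int.toStr (PySem.List.pyGetD ll (start + ((m : Nat) : Int)) 0))
          else pvSigs ll (m - 1)) = pvSigs ll m := by
        by_cases hm : 0 < m
        · rw [if_pos (by exact_mod_cast hm)]
          have hc : ((m : Nat) : Int) = (((m - 1 : Nat)) : Int) + 1 := by omega
          rw [hc, pvSigs_step ll (m - 1)]
          congr 1
          omega
        · have hm0 : m = 0 := by omega
          subst hm0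
          simp
      rw [hsigs, ← PySem.Dict.counter_eq_foldl]
      simp
  unfold count_ngrams_alt
  rw [PySem.List.pyRange_one]
  simp only [Int.sub_zero]
  exact congrArg Prod.fst (main n.toNat)

-- ===== VERDICT (by name: the statement is the Claim_ definition above) =====
theorem count_ngrams_spec : Claim_equal_count_ngrams := by
  intro ll n _
  unfold Spec_count_ngrams
  rw [countA_eq, countB_eq]
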